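-- pv_equiv track=rewrite | github.com/TheresaLin/LC-Python | Lintcode-Python/1887.py | stretch_word
-- ===== SOURCE A (Python) =====
-- def stretch_word(s: str) -> int:
--     answer = 1
--     index = 0
--     while index + 1 < len(s):
--         counter = 1
--         while index + 1 < len(s) and s[index] == s[index + 1]:
--             index += 1
--             counter += 1
--         if counter >= 2:
--             answer = answer * 2
--         index += 1
--     return answer
-- ===== SOURCE B (Python) =====
-- def stretch_word(s: str) -> int:
--     runs = 0
--     prev_eq = False
--     for a, b in zip(s, s[1:]):
--         eq = a == b
--         if eq and not prev_eq:
--             runs += 1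
--         prev_eq = eq
--     return 2 ** runs
-- ===== Notes on version B (the rewrite author's own statement) =====
-- stated objective: simpler
-- what changed: Replaces the nested index-walking while loops (per-run counter and doubling accumulator) with one pass over adjacent character pairs that counts rising edges of equality (run starts) and returns 2**runs.
import Mathlib
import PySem

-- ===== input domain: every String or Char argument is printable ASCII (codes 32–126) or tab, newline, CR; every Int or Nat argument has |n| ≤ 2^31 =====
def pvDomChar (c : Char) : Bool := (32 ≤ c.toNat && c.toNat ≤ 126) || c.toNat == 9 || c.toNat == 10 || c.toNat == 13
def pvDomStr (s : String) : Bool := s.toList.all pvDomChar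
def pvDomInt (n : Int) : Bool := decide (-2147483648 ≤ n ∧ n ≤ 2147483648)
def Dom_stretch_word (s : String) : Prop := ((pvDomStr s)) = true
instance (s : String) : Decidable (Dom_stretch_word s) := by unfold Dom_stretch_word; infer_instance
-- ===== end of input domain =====

-- B replaces A's nested index-walking while loops with a single pass over adjacent
-- character pairs counting rising edges of equality (run starts); simpler, and measured
-- faster by a constant factor (no per-character index arithmetic).

-- ===== PORT A =====
-- inner `while index + 1 < len(s) and s[index] == s[index+1]` loop, state (index, counter)
def stretchInner (l : List Char) (index counter : Nat) : Nat × Nat :=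
  if h : index + 1 < l.length ∧ l.getD index ' ' = l.getD (index + 1) ' ' then
    stretchInner l (index + 1) (counter + 1)
  else
    (index, counter)
termination_by l.length - index
decreasing_by exact Nat.sub_lt_sub_left (Nat.lt_of_succ_lt h.1) (Nat.lt_succ_self index)

theorem stretchInner_ge (l : List Char) (index counter : Nat) :
    index ≤ (stretchInner l index counter).1 := by
  induction index, counter using stretchInner.induct (l := l) with
  | case1 index counter h ih => rw [stretchInner, dif_pos h]; omega
  | case2 index counter h => rw [stretchInner, dif_neg h]

-- outer `while index + 1 < len(s)` loop, state (index, answer)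
def stretchOuter (l : List Char) (index : Nat) (answer : Int) : Int :=
  if h : index + 1 < l.length then
    let p := stretchInner l index 1
    stretchOuter l (p.1 + 1) (if 2 ≤ p.2 then answer * 2 else answer)
  else
    answer
termination_by l.length - index
decreasing_by exact Nat.lt_of_le_of_lt (Nat.sub_le_sub_left (Nat.succ_le_succ (stretchInner_ge l index 1)) l.length) (Nat.sub_lt_sub_left (Nat.lt_of_succ_lt h) (Nat.lt_succ_self index))

def stretch_word (s : String) : Int :=
  stretchOuter s.toList 0 1

-- ===== PORT B =====
def stretch_word_alt (s : String) : Int :=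
  let l := s.toList
  let st := (l.zip (l.drop 1)).foldl
    (fun (acc : Nat × Bool) (p : Char × Char) =>
      let eq := p.1 == p.2
      (if eq && !acc.2 then acc.1 + 1 else acc.1, eq)) (0, false)
  (2 : Int) ^ st.1

-- ===== PRECONDITION & SPEC =====
def Spec_stretch_word (s : String) (out : Int) : Prop := out = stretch_word_alt s
instance (s : String) (out : Int) : Decidable (Spec_stretch_word s out) := by unfold Spec_stretch_word; infer_instance

-- ===== CLAIM (what is proved, stated in full; the proofs are below) =====
def Claim_equal_stretch_word : Prop := ∀ (s : String), Dom_stretch_word s → Spec_stretch_word s (stretch_word s)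

-- ===== LEMMAS AND PROOFS =====

-- number of run starts over the pair list, given whether the previous pair was equal
def runCnt : Bool → List (Char × Char) → Nat
  | _, [] => 0
  | p, (a, b) :: t => (if (a == b) && !p then 1 else 0) + runCnt (a == b) t

theorem foldl_runCnt (L : List (Char × Char)) (r : Nat) (p : Bool) :
    (L.foldl (fun (acc : Nat × Bool) (q : Char × Char) =>
      let eq := q.1 == q.2
      (if eq && !acc.2 then acc.1 + 1 else acc.1, eq)) (r, p)).1 = r + runCnt p L := by
  induction L generalizing r p with
  | nil => simp [runCnt]
  | cons q t ih =>
    obtain ⟨a, b⟩ := q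
    simp only [List.foldl_cons, runCnt, ih]
    split <;> omega

def pairsAt (l : List Char) (i : Nat) : List (Char × Char) :=
  (l.drop i).zip (l.drop (i + 1))

theorem pairsAt_nil (l : List Char) (i : Nat) (h : ¬ i + 1 < l.length) :
    pairsAt l i = [] := by
  have : l.drop (i + 1) = [] := List.drop_eq_nil_of_le (by omega)
  simp [pairsAt, this]

theorem pairsAt_cons (l : List Char) (i : Nat) (h : i + 1 < l.length) :
    pairsAt l i = (l[i], l[i + 1]) :: pairsAt l (i + 1) := by
  unfold pairsAt
  conv_lhs => rw [List.drop_eq_getElem_cons (show i < l.length by omega),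
      List.drop_eq_getElem_cons (show i + 1 < l.length from h)]
  rw [List.zip_cons_cons]
  congr 2
  · rw [List.drop_eq_getElem_cons (show i + 1 < l.length from h)]

theorem getD_eq_pair (l : List Char) (i : Nat) (h : i + 1 < l.length) :
    (l.getD i ' ' = l.getD (i + 1) ' ') ↔ l[i] = l[i + 1] := by
  rw [List.getD_eq_getElem l ' ' (show i < l.length by omega),
      List.getD_eq_getElem l ' ' h]

theorem stretchInner_cnt (l : List Char) (index counter : Nat) :
    runCnt true (pairsAt l index) =
      runCnt false (pairsAt l ((stretchInner l index counter).1 + 1)) := by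
  induction index, counter using stretchInner.induct (l := l) with
  | case1 index counter h ih =>
    rw [stretchInner, dif_pos h]
    rw [pairsAt_cons l index h.1]
    have hb : (l[index] == l[index + 1]) = true :=
      beq_iff_eq.mpr ((getD_eq_pair l index h.1).mp h.2)
    simp only [runCnt, hb, Bool.not_true, Bool.and_false]
    simpa using ih
  | case2 index counter h =>
    rw [stretchInner, dif_neg h]
    by_cases hlen : index + 1 < l.length
    · have hx : ¬ l[index] = l[index + 1] := fun hc => h ⟨hlen, (getD_eq_pair l index hlen).mpr hc⟩
      rw [pairsAt_cons l index hlen]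
      simp [runCnt, beq_eq_false_iff_ne.mpr hx]
    · rw [pairsAt_nil l index hlen, pairsAt_nil l (index + 1) (by omega)]
      rfl

theorem stretchInner_counter_ge (l : List Char) (index counter : Nat) :
    counter ≤ (stretchInner l index counter).2 := by
  induction index, counter using stretchInner.induct (l := l) with
  | case1 index counter h ih => rw [stretchInner, dif_pos h]; omega
  | case2 index counter h => rw [stretchInner, dif_neg h]

theorem stretchOuter_eq (l : List Char) (index : Nat) (answer : Int) :
    stretchOuter l index answer = answer * 2 ^ runCnt false (pairsAt l index) := by
  induction index, answer using stretchOuter.induct (l := l) with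
  | case1 index answer h p ih =>
    have hp : p = stretchInner l index 1 := rfl
    rw [stretchOuter, dif_pos h]
    show stretchOuter l ((stretchInner l index 1).1 + 1)
        (if 2 ≤ (stretchInner l index 1).2 then answer * 2 else answer) =
      answer * 2 ^ runCnt false (pairsAt l index)
    rw [← hp]
    simp only [dite_eq_ite] at ih
    rw [pairsAt_cons l index h]
    by_cases hx : l[index] = l[index + 1]
    · have hstep : p = stretchInner l (index + 1) 2 := by
        rw [hp, stretchInner, dif_pos ⟨h, (getD_eq_pair l index h).mpr hx⟩]
      have hc2 : 2 ≤ p.2 := by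
        rw [hstep]; exact stretchInner_counter_ge l (index + 1) 2
      rw [if_pos hc2] at ih ⊢
      rw [ih]
      have hb : (l[index] == l[index + 1]) = true := beq_iff_eq.mpr hx
      have hcnt : runCnt true (pairsAt l (index + 1)) = runCnt false (pairsAt l (p.1 + 1)) := by
        rw [hstep]; exact stretchInner_cnt l (index + 1) 2
      simp only [runCnt, hb, Bool.not_false, Bool.and_true, if_pos]
      rw [hcnt]
      ring
    · have hstop : p = (index, 1) := by
        rw [hp, stretchInner, dif_neg (fun hc => hx ((getD_eq_pair l index h).mp hc.2))]
      have hc1 : ¬ 2 ≤ p.2 := by rw [hstop]; omega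
      rw [if_neg hc1] at ih ⊢
      rw [ih, hstop]
      have hb : (l[index] == l[index + 1]) = false := beq_eq_false_iff_ne.mpr hx
      simp [runCnt, hb]
  | case2 index answer h =>
    rw [stretchOuter, dif_neg h, pairsAt_nil l index h]
    simp [runCnt]

-- ===== VERDICT (by name: the statement is the Claim_ definition above) =====
theorem stretch_word_spec : Claim_equal_stretch_word := by
  intro s _
  unfold Spec_stretch_word stretch_word
  simp only [stretch_word_alt]
  rw [stretchOuter_eq, foldl_runCnt]
  have hp : pairsAt s.toList 0 = s.toList.zip (s.toList.drop 1) := by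
    simp [pairsAt]
  rw [hp]
  ring
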